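-- pv_equiv track=rewrite | github.com/yaoyz96/a-met | datasets/datareg.py | idx2label
-- ===== SOURCE A (Python) =====
-- def idx2label(label):
--     label_str = {}
--     num = len(label)
--     k = 0
--     for i in range(num):
--         if i == 0:
--             label_str[i] = label[i]
--         else:
--             if label[i] != label[i-1]:
--                 k += 1
--                 label_str[k] = label[i]
--     return label_str
-- ===== SOURCE B (Python) =====
-- def idx2label(label):
--     # peel off one maximal run of equal elements at a time, collecting run heads
--     heads = []
--     i = 0
--     n = len(label)
--     while i < n:
--         heads.append(label[i])
--         j = i + 1
--         while j < n and label[j] == label[i]: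
--             j += 1
--         i = j
--     return dict(enumerate(heads))
-- ===== Notes on version B (the rewrite author's own statement) =====
-- stated objective: alternative
-- what changed: B decomposes the list into maximal runs: an outer loop records each run head and an inner loop skips past the whole run, then the dict is built in one shot as dict(enumerate(heads)), instead of A's flat index loop comparing each element with its predecessor while maintaining a run counter k and an i==0 special case.
import Mathlib
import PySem

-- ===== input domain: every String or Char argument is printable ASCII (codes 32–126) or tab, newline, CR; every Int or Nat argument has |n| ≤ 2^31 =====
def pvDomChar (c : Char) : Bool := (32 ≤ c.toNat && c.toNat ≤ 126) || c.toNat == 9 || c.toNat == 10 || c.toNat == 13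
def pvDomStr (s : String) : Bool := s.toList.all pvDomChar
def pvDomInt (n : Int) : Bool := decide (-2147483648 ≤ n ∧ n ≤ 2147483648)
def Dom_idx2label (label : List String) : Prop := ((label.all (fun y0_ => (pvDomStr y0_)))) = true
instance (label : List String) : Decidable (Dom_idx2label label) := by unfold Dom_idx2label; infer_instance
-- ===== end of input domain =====

-- B decomposes the list into maximal runs (outer loop records a run head, inner loop skips the
-- whole run, then dict(enumerate(heads))) instead of A's flat index loop with a run counter; return value only.

-- ===== PORT A =====
-- loop body of A's 'for i in range(num)' (state: (label_str, k))
def idx2labelStep (label : List String) (st : PySem.Dict Int String × Int) (i : Int) :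
    PySem.Dict Int String × Int :=
  if i == 0 then (st.1.insert i (PySem.List.pyGetD label i ""), st.2)
  else if PySem.List.pyGetD label i "" ≠ PySem.List.pyGetD label (i - 1) "" then
    (st.1.insert (st.2 + 1) (PySem.List.pyGetD label i ""), st.2 + 1)
  else st

def idx2label (label : List String) : List (Int × String) :=
  (((PySem.List.pyRange 0 (label.length : Int) 1).foldl (idx2labelStep label)
      (PySem.Dict.empty, 0)).1).items

-- ===== PORT B =====
-- B's inner 'while j < n and label[j] == label[i]': skip the rest of the current run (suffix view)
def pvSkipRun (h : String) : List String → List String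
  | [] => []
  | x :: t => if x == h then pvSkipRun h t else x :: t

theorem pvSkipRun_length_le (h : String) (t : List String) :
    (pvSkipRun h t).length ≤ t.length := by
  induction t with
  | nil => simp [pvSkipRun]
  | cons x r ih =>
      simp only [pvSkipRun]
      split_ifs <;> simp <;> omega

-- B's outer while loop over suffixes: record the run head, continue after the skipped run
def pvRuns : List String → List String
  | [] => []
  | x :: t => x :: pvRuns (pvSkipRun x t)
termination_by l => l.length
decreasing_by
  have := pvSkipRun_length_le x t
  simp
  omega

def idx2label_alt (label : List String) : List (Int × String) :=
  (PySem.Dict.ofList (PySem.List.enumerate (pvRuns label) 0)).items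

-- ===== PRECONDITION & SPEC =====
def Spec_idx2label (label : List String) (out : List (Int × String)) : Prop := out = idx2label_alt label
instance (label : List String) (out : List (Int × String)) : Decidable (Spec_idx2label label out) := by unfold Spec_idx2label; infer_instance

-- ===== CLAIM (what is proved, stated in full; the proofs are below) =====
def Claim_equal_idx2label : Prop := ∀ (label : List String), Dom_idx2label label → Spec_idx2label label (idx2label label)

-- ===== LEMMAS AND PROOFS =====

-- the elements of `l` that start a new run, given previous element `p`
def pvChg (p : String) : List String → List String
  | [] => []
  | x :: rest => if x ≠ p then x :: pvChg x rest else pvChg x rest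

-- first elements of the maximal runs of equal consecutive elements
def pvHeads : List String → List String
  | [] => []
  | x :: rest => x :: pvChg x rest

theorem pvChg_append (l : List String) (p x : String) :
    pvChg p (l ++ [x]) = pvChg p l ++ (if x ≠ l.getLastD p then [x] else []) := by
  induction l generalizing p with
  | nil => simp [pvChg]
  | cons y t ih =>
      simp only [List.cons_append, pvChg, ih y, List.getLastD_cons]
      split_ifs <;> simp

theorem pvHeads_append (h : String) (t : List String) (x : String) :
    pvHeads ((h :: t) ++ [x]) =
      pvHeads (h :: t) ++ (if x ≠ (h :: t).getLastD "" then [x] else []) := by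
  simp only [List.cons_append, pvHeads, pvChg_append, List.getLastD_cons]

theorem pvHeads_take_ne_nil (l : List String) (m : Nat) (h1 : 1 ≤ m) (h2 : m ≤ l.length) :
    ∃ h t, l.take m = h :: t := by
  cases l with
  | nil => simp at h2; omega
  | cons a s =>
      cases m with
      | zero => omega
      | succ m' => exact ⟨a, s.take m', by simp⟩

theorem pvGetLastD_take (l : List String) (m : Nat) (d : String)
    (h1 : 1 ≤ m) (h2 : m ≤ l.length) : (l.take m).getLastD d = l.getD (m - 1) "" := by
  induction l generalizing m d with
  | nil => simp at h2; omega
  | cons a s ih =>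
      cases m with
      | zero => omega
      | succ m' =>
          cases Nat.eq_zero_or_pos m' with
          | inl h0 => subst h0; simp
          | inr hp =>
              have hm' : m' ≤ s.length := by simpa using h2
              have := ih m' a hp hm'
              simp only [List.take_succ_cons, List.getLastD_cons, this]
              have : m' = (m' - 1) + 1 := by omega
              rw [this]
              simp

theorem pv_fresh_key (hs : List String) :
    (PySem.Dict.mk (PySem.List.enumerate hs 0)).contains ((hs.length : Int)) = false := by
  rw [PySem.Dict.contains_mk]
  apply List.any_eq_false.mpr
  intro p hp
  have hmem : p.1 ∈ (PySem.List.enumerate hs 0).map (fun x => x.1) :=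
    List.mem_map_of_mem hp
  rw [PySem.List.map_fst_enumerate] at hmem
  rw [PySem.List.mem_pyRange_one] at hmem
  simp only [beq_iff_eq]
  intro hc
  rw [hc] at hmem
  omega

-- invariant of A's loop: after indices 0..m-1 the dict enumerates the run heads of take m
theorem pv_foldA (label : List String) (m : Nat) (h1 : 1 ≤ m) (h2 : m ≤ label.length) :
    (PySem.List.pyRange 0 (m : Int) 1).foldl (idx2labelStep label) (PySem.Dict.empty, 0)
      = (PySem.Dict.mk (PySem.List.enumerate (pvHeads (label.take m)) 0),
          ((pvHeads (label.take m)).length : Int) - 1) := by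
  induction m with
  | zero => omega
  | succ m' ih =>
      cases Nat.eq_zero_or_pos m' with
      | inl h0 =>
          subst h0
          cases label with
          | nil => simp at h2
          | cons a s =>
              have h01 : ((0 + 1 : Nat) : Int) = (0 : Int) + 1 := by norm_num
              rw [h01, PySem.List.pyRange_one_singleton]
              simp only [List.foldl_cons, List.foldl_nil, idx2labelStep]
              simp [PySem.List.pyGetD_zero_cons, pvHeads, pvChg,
                PySem.List.enumerate, PySem.Dict.insert,
                PySem.Dict.empty, PySem.Dict.contains]
      | inr hp =>
          have hmlen : m' < label.length := by omega
          have hsplit : PySem.List.pyRange 0 ((m' + 1 : Nat) : Int) 1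
              = PySem.List.pyRange 0 (m' : Int) 1 ++ [(m' : Int)] := by
            have : ((m' + 1 : Nat) : Int) = (m' : Int) + 1 := by push_cast; ring
            rw [this, PySem.List.pyRange_one_succ_right (by positivity)]
          rw [hsplit, List.foldl_append, ih hp (by omega)]
          -- one more step at index m'
          have hne0 : ((m' : Int) == 0) = false := by
            simp only [beq_eq_false_iff_ne, ne_eq]
            omega
          have hgm : PySem.List.pyGetD label ((m' : Int)) "" = label[m'] :=
            PySem.List.pyGetD_ofNat label m' "" hmlen
          have hgm1 : PySem.List.pyGetD label ((m' : Int) - 1) "" = label.getD (m' - 1) "" := by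
            have : ((m' : Int)) - 1 = (((m' - 1 : Nat)) : Int) := by omega
            rw [this, PySem.List.pyGetD_natCast]
          have htake : label.take (m' + 1) = label.take m' ++ [label[m']] := by
            rw [List.take_add_one]
            simp [List.getElem?_eq_getElem hmlen]
          obtain ⟨h, t, hht⟩ := pvHeads_take_ne_nil label m' hp (by omega)
          have hlast : (label.take m').getLastD "" = label.getD (m' - 1) "" :=
            pvGetLastD_take label m' "" hp (by omega)
          rw [List.foldl_cons, List.foldl_nil]
          simp only [idx2labelStep, hne0, Bool.false_eq_true, if_false, hgm, hgm1, htake]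
          rw [hht, pvHeads_append, ← hht, hlast]
          split_ifs with hd
          · have hk : ((pvHeads (label.take m')).length : Int) - 1 + 1
                = ((pvHeads (label.take m')).length : Int) := by ring
            rw [hk]
            refine Prod.ext_iff.mpr ⟨?_, ?_⟩
            · apply PySem.Dict.ext
              rw [PySem.Dict.items_insert_of_not_contains _ _ (pv_fresh_key _)]
              rw [PySem.List.enumerate_append]
              simp [PySem.List.enumerate]
            · simp
          · simp

-- B's recursive run decomposition computes exactly the run heads
theorem pvRuns_skipRun (t : List String) (p : String) :
    pvRuns (pvSkipRun p t) = pvChg p t := by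
  induction t generalizing p with
  | nil => simp [pvSkipRun, pvChg, pvRuns]
  | cons x r ih =>
      by_cases hx : x = p
      · subst hx
        simp only [pvSkipRun, beq_self_eq_true, if_true, pvChg, ne_eq, not_true_eq_false,
          if_false, ih]
      · have hb : (x == p) = false := by simpa using hx
        simp only [pvSkipRun, hb, Bool.false_eq_true, if_false, pvRuns, pvChg, ne_eq, hx,
          not_false_eq_true, if_true, ih]

theorem pvRuns_eq_heads (label : List String) : pvRuns label = pvHeads label := by
  cases label with
  | nil => simp [pvRuns, pvHeads]
  | cons x t => simp only [pvRuns, pvHeads, pvRuns_skipRun]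

theorem pv_nodup_enum_keys (hs : List String) :
    ((PySem.List.enumerate hs 0).map (fun x => x.1)).Nodup := by
  rw [PySem.List.map_fst_enumerate]
  exact PySem.List.nodup_pyRange_one 0 _

theorem pv_ofList_items (ps : List (Int × String)) (h : (ps.map (fun x => x.1)).Nodup) :
    (PySem.Dict.ofList ps).items = ps := by
  unfold PySem.Dict.ofList PySem.Dict.update
  rw [PySem.Dict.items_foldl_insert_fresh ps (fun p => p.1) (fun p => p.2) _
    (by intro a _; rfl) h]
  simp [PySem.Dict.empty]

-- ===== VERDICT (by name: the statement is the Claim_ definition above) =====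
theorem idx2label_spec : Claim_equal_idx2label := by
  intro label _
  unfold Spec_idx2label idx2label idx2label_alt
  rw [pvRuns_eq_heads, pv_ofList_items _ (pv_nodup_enum_keys _)]
  cases label with
  | nil => simp [pvHeads, PySem.Dict.empty]
  | cons h t =>
      rw [pv_foldA (h :: t) (h :: t).length (by simp) (le_refl _)]
      simp
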